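-- pv_equiv track=rewrite | github.com/WBChe/memory_test_model_host | make_pattern/make_pattern.py | generate_sequenceff
-- ===== SOURCE A (Python) =====
-- def generate_sequenceff(start, end):
--     increments = [1, 511]
--     current_index = 0
--
--     current = start
--
--     while current <= end:
--         yield current
--         current += increments[current_index]
--         current_index = (current_index + 1) % len(increments)
-- ===== SOURCE B (Python) =====
-- def generate_sequenceff(start, end):
--     # Blocks of two values 512 apart: base and base+1, then base += 512.
--     base = start
--     while base <= end:
--         yield base
--         if base + 1 <= end:
--             yield base + 1
--         base += 512
-- ===== Notes on version B (the rewrite author's own statement) =====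
-- stated objective: alternative
-- what changed: Replaces the increments list and modular toggle index with block emission: each iteration yields base and (if in range) base+1, then advances base by 512.
import Mathlib
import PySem

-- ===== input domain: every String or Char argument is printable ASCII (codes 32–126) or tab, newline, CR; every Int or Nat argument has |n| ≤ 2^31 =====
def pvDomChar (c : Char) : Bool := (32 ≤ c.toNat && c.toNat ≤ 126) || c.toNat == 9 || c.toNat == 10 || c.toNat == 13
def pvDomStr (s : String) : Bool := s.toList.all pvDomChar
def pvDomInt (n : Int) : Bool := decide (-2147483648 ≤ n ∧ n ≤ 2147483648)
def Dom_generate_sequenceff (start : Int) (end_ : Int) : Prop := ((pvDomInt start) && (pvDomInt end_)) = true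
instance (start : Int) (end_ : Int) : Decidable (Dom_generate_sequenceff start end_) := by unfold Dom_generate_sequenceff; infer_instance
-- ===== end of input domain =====

-- B replaces the increments list and toggle index with 512-wide block emission (pair per block); equivalent, no speed claim.
-- ===== PORT A =====
-- A: while current <= end, yield current, then add increments[idx] (1 or 511), toggling idx mod 2.
def generate_sequenceff_go (end_ : Int) (current : Int) (idx : Nat) : List Int :=
  if h : current ≤ end_ then
    current :: generate_sequenceff_go end_ (current + (if idx % 2 = 0 then 1 else 511)) ((idx + 1) % 2)
  else []
termination_by (end_ + 1 - current).toNat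
decreasing_by
  rcases Nat.mod_two_eq_zero_or_one idx with h2 | h2 <;> simp [h2] <;> omega

def generate_sequenceff (start : Int) (end_ : Int) : List Int :=
  generate_sequenceff_go end_ start 0

-- ===== PORT B =====
-- B: blocks of two values 512 apart: base, then base+1 if in range, then base += 512.
def generate_sequenceff_alt_go (end_ : Int) (base : Int) : List Int :=
  if h : base ≤ end_ then
    base :: ((if base + 1 ≤ end_ then [base + 1] else []) ++ generate_sequenceff_alt_go end_ (base + 512))
  else []
termination_by (end_ + 1 - base).toNat
decreasing_by omega

def generate_sequenceff_alt (start : Int) (end_ : Int) : List Int :=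
  generate_sequenceff_alt_go end_ start

-- ===== PRECONDITION & SPEC =====
def Spec_generate_sequenceff (start : Int) (end_ : Int) (out : List Int) : Prop := out = generate_sequenceff_alt start end_
instance (start : Int) (end_ : Int) (out : List Int) : Decidable (Spec_generate_sequenceff start end_ out) := by unfold Spec_generate_sequenceff; infer_instance

-- ===== CLAIM (what is proved, stated in full; the proofs are below) =====
def Claim_equal_generate_sequenceff : Prop := ∀ (start : Int) (end_ : Int), Dom_generate_sequenceff start end_ → Spec_generate_sequenceff start end_ (generate_sequenceff start end_)

-- ===== LEMMAS AND PROOFS =====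
theorem goA_unfold (end_ c : Int) (idx : Nat) : generate_sequenceff_go end_ c idx =
    if c ≤ end_ then
      c :: generate_sequenceff_go end_ (c + (if idx % 2 = 0 then 1 else 511)) ((idx + 1) % 2)
    else [] := by
  rw [generate_sequenceff_go]; rfl

theorem goB_unfold (end_ base : Int) : generate_sequenceff_alt_go end_ base =
    if base ≤ end_ then
      base :: ((if base + 1 ≤ end_ then [base + 1] else []) ++ generate_sequenceff_alt_go end_ (base + 512))
    else [] := by
  rw [generate_sequenceff_alt_go]; rfl

theorem go_eq (end_ c : Int) : generate_sequenceff_go end_ c 0 = generate_sequenceff_alt_go end_ c := by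
  rw [goA_unfold, goB_unfold]
  by_cases h1 : c ≤ end_
  · simp only [if_pos h1]
    rw [goA_unfold]
    by_cases h2 : c + 1 ≤ end_
    · have ih := go_eq end_ (c + 512)
      simp only [if_pos h2]
      norm_num
      rw [if_pos (show c < end_ by omega), show c + 1 + 511 = c + 512 by ring, ih]
    · simp only [if_neg h2]
      rw [goB_unfold, if_neg (by omega : ¬ c + 512 ≤ end_)]
      norm_num
      intro h; exact absurd h (by omega)
  · simp only [if_neg h1]
termination_by (end_ + 1 - c).toNat
decreasing_by omega

-- ===== VERDICT (by name: the statement is the Claim_ definition above) =====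
theorem generate_sequenceff_spec : Claim_equal_generate_sequenceff := by
  intro start end_ _
  unfold Spec_generate_sequenceff generate_sequenceff generate_sequenceff_alt
  exact go_eq end_ start
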